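-- pv_equiv track=rewrite | github.com/Pavithrav2005/Password_Strength_Analyser | src/feature_extraction.py | _count_sequential_chars
-- ===== SOURCE A (Python) =====
-- def _count_sequential_chars(password):
--     """Count sequential character sequences"""
--     count = 0
--     i = 0
--     while i < len(password) - 2:
--         if (ord(password[i+1]) == ord(password[i]) + 1 and
--             ord(password[i+2]) == ord(password[i+1]) + 1):
--             seq_length = 3
--             j = i + 3
--             while j < len(password) and ord(password[j]) == ord(password[j-1]) + 1:
--                 seq_length += 1
--                 j += 1
--             count += seq_length
--             i = j
--         else:
--             i += 1
--     return count
-- ===== SOURCE B (Python) =====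
-- def _count_sequential_chars(password):
--     """Count sequential character sequences"""
--     count = 0
--     run = 1
--     for prev, cur in zip(password, password[1:]):
--         if ord(cur) == ord(prev) + 1:
--             run += 1
--         else:
--             if run >= 3:
--                 count += run
--             run = 1
--     if run >= 3:
--         count += run
--     return count
-- ===== Notes on version B (the rewrite author's own statement) =====
-- stated objective: simpler
-- what changed: Replaced the nested two-pointer scan with index jumps by a single flat pass over adjacent character pairs maintaining a current run length that is flushed into the count when a run of >= 3 ends.
import Mathlib
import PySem

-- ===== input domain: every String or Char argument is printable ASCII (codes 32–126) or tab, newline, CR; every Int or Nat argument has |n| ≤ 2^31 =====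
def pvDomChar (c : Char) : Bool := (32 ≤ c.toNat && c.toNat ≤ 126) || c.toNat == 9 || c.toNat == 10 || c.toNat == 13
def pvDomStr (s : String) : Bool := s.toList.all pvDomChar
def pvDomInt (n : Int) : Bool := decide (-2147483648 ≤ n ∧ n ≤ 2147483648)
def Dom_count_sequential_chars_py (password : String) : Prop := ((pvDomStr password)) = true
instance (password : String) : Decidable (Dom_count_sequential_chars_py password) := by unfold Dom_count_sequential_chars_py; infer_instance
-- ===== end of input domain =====

-- B replaces A's nested two-pointer scan (outer index + inner run scan + jump) by one flat
-- pass over adjacent pairs with a running run-length accumulator; same cost, simpler.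

-- ===== PORT A =====
-- Inner while loop of A: `while j < len and ord(p[j]) == ord(p[j-1]) + 1: seq += 1; j += 1`,
-- returning (seq_length, j). Indices are Python ints that stay ≥ 0, modelled as Nat.
def aInner (cs : List Char) (j : Nat) (seq : Int) : Int × Nat :=
  if h : j < cs.length ∧ (cs.getD j ' ').toNat = (cs.getD (j-1) ' ').toNat + 1 then
    aInner cs (j+1) (seq+1)
  else
    (seq, j)
termination_by cs.length - j
decreasing_by omega

-- length bound on the resulting index, needed for aLoop's termination
theorem aInner_drop_len (cs : List Char) (j : Nat) (seq : Int) :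
    cs.length - (aInner cs j seq).2 ≤ cs.length - j := by
  fun_induction aInner with
  | case1 _ _ _ ih => omega
  | case2 => simp

-- Outer while loop of A: `while i < len(password) - 2: …` (for i ≥ 0 this is i + 2 < len).
def aLoop (cs : List Char) (i : Nat) (count : Int) : Int :=
  if h : i + 2 < cs.length then
    if (cs.getD (i+1) ' ').toNat = (cs.getD i ' ').toNat + 1 ∧
       (cs.getD (i+2) ' ').toNat = (cs.getD (i+1) ' ').toNat + 1 then
      let r := aInner cs (i+3) 3
      aLoop cs r.2 (count + r.1)
    else
      aLoop cs (i+1) count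
  else
    count
termination_by cs.length - i
decreasing_by
  · have := aInner_drop_len cs (i+3) 3; omega
  · omega

def count_sequential_chars_py (password : String) : Int :=
  aLoop password.toList 0 0

-- ===== PORT B =====
-- one fold step over an adjacent pair (prev, cur); state = (count, run)
def bStep (st : Int × Int) (p : Char × Char) : Int × Int :=
  if p.2.toNat = p.1.toNat + 1 then (st.1, st.2 + 1)
  else (if st.2 ≥ 3 then st.1 + st.2 else st.1, 1)

def count_sequential_chars_py_alt (password : String) : Int :=
  let cs := password.toList
  let st := (cs.zip cs.tail).foldl bStep (0, 1)
  if st.2 ≥ 3 then st.1 + st.2 else st.1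

-- ===== PRECONDITION & SPEC =====
def Spec_count_sequential_chars_py (password : String) (out : Int) : Prop := out = count_sequential_chars_py_alt password
instance (password : String) (out : Int) : Decidable (Spec_count_sequential_chars_py password out) := by unfold Spec_count_sequential_chars_py; infer_instance

-- ===== CLAIM (what is proved, stated in full; the proofs are below) =====
def Claim_equal_count_sequential_chars_py : Prop := ∀ (password : String), Dom_count_sequential_chars_py password → Spec_count_sequential_chars_py password (count_sequential_chars_py password)

-- ===== LEMMAS AND PROOFS =====

-- list-level version of A's inner loop: consume the ascending run after `p`
def takeRun (p : Char) (l : List Char) (seq : Int) : Int × List Char :=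
  match l with
  | [] => (seq, [])
  | x :: t => if x.toNat = p.toNat + 1 then takeRun x t (seq+1) else (seq, x :: t)

theorem takeRun_snd_len (l : List Char) : ∀ (p : Char) (seq : Int),
    ((takeRun p l seq).2).length ≤ l.length := by
  induction l with
  | nil => intro p seq; simp [takeRun]
  | cons x t ih =>
    intro p seq
    by_cases h : x.toNat = p.toNat + 1
    · simp only [takeRun, if_pos h]
      have := ih x (seq+1); simp; omega
    · simp [takeRun, h]

-- list-level version of A's outer loop
def aList (l : List Char) (count : Int) : Int :=
  match l with
  | c :: d :: e :: t =>
    if d.toNat = c.toNat + 1 ∧ e.toNat = d.toNat + 1 then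
      aList (takeRun e t 3).2 (count + (takeRun e t 3).1)
    else
      aList (d :: e :: t) count
  | _ => count
termination_by l.length
decreasing_by
  · have := takeRun_snd_len t e 3; simpa using by omega
  · simp

theorem aList_nil (count : Int) : aList [] count = count := by rw [aList]; simp
theorem aList_one (c : Char) (count : Int) : aList [c] count = count := by rw [aList]; simp
theorem aList_two (c d : Char) (count : Int) : aList [c, d] count = count := by rw [aList]; simp

-- list-level version of B: process remaining chars with head `c`, state (count, run)
def F (c : Char) (l : List Char) (count run : Int) : Int :=
  match l with
  | [] => if run ≥ 3 then count + run else count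
  | d :: t =>
    if d.toNat = c.toNat + 1 then F d t count (run+1)
    else F d t (if run ≥ 3 then count + run else count) 1

-- B's fold computes F
theorem foldl_bStep_eq_F (t : List Char) (c : Char) (count run : Int) :
    (let st := ((c :: t).zip t).foldl bStep (count, run);
     if st.2 ≥ 3 then st.1 + st.2 else st.1) = F c t count run := by
  induction t generalizing c count run with
  | nil => simp [F]
  | cons x r ih =>
    simp only [List.zip_cons_cons, List.foldl_cons, F, bStep]
    by_cases h : x.toNat = c.toNat + 1 <;> simp [h, ih]

-- A's inner loop computes takeRun on the dropped suffix
theorem aInner_eq_takeRun (rest : List Char) (cs : List Char) (j : Nat) (seq : Int) (p : Char)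
    (hj : 1 ≤ j) (hd : cs.drop (j-1) = p :: rest) :
    (aInner cs j seq).1 = (takeRun p rest seq).1 ∧
    cs.drop ((aInner cs j seq).2) = (takeRun p rest seq).2 := by
  induction rest generalizing j seq p with
  | nil =>
    have hdj : cs.drop j = [] := by
      have h2 : cs.drop j = (cs.drop (j-1)).drop 1 := by
        rw [List.drop_drop]; congr 1; omega
      simp [h2, hd]
    have hlen : cs.length ≤ j := by
      have h3 : (cs.drop j).length = cs.length - j := List.length_drop
      rw [hdj] at h3; simp at h3; omega
    rw [aInner, dif_neg (by omega)]
    simp [takeRun, hdj]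
  | cons x r ih =>
    have hdj : cs.drop j = x :: r := by
      have h2 : cs.drop j = (cs.drop (j-1)).drop 1 := by
        rw [List.drop_drop]; congr 1; omega
      simp [h2, hd]
    have hjlt : j < cs.length := by
      by_contra hc
      simp [List.drop_eq_nil_of_le (by omega : cs.length ≤ j)] at hdj
    have hgj : cs.getD j ' ' = x := by
      have h1 : (cs.drop j).head? = cs[j]? := List.head?_drop
      rw [hdj] at h1
      simp [List.getD, ← h1]
    have hgp : cs.getD (j-1) ' ' = p := by
      have h1 : (cs.drop (j-1)).head? = cs[j-1]? := List.head?_drop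
      rw [hd] at h1
      simp [List.getD, ← h1]
    rw [aInner]
    by_cases hx : x.toNat = p.toNat + 1
    · rw [dif_pos (by exact ⟨hjlt, by rw [hgj, hgp]; exact hx⟩)]
      have := ih (j+1) (seq+1) x (by omega) (by simpa using hdj)
      simpa [takeRun, hx] using this
    · rw [dif_neg (by rw [hgj, hgp]; rintro ⟨-, h⟩; exact hx h)]
      simp [takeRun, hx, hdj]

-- A's outer loop computes aList on the dropped suffix
theorem aLoop_eq_aList (n : Nat) (cs : List Char) (i : Nat) (count : Int)
    (hn : cs.length - i ≤ n) :
    aLoop cs i count = aList (cs.drop i) count := by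
  induction n generalizing i count with
  | zero =>
    have hge : cs.length ≤ i := by omega
    rw [aLoop, dif_neg (by omega), List.drop_eq_nil_of_le hge, aList_nil]
  | succ n ih =>
    rw [aLoop]
    by_cases h : i + 2 < cs.length
    · rw [dif_pos h]
      obtain ⟨c, d, e, t, hdrop⟩ : ∃ c d e t, cs.drop i = c :: d :: e :: t := by
        have h3 : (cs.drop i).length = cs.length - i := List.length_drop
        match hx : cs.drop i with
        | c :: d :: e :: t => exact ⟨c, d, e, t, rfl⟩
        | [] => rw [hx] at h3; simp at h3; omega
        | [c] => rw [hx] at h3; simp at h3; omega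
        | [c, d] => rw [hx] at h3; simp at h3; omega
      have hd1 : cs.drop (i+1) = d :: e :: t := by
        have h2 : cs.drop (i+1) = (cs.drop i).drop 1 := by rw [List.drop_drop]
        simp [h2, hdrop]
      have hd2 : cs.drop (i+2) = e :: t := by
        have h2 : cs.drop (i+2) = (cs.drop i).drop 2 := by rw [List.drop_drop]
        simp [h2, hdrop]
      have hg0 : cs.getD i ' ' = c := by
        have h1 : (cs.drop i).head? = cs[i]? := List.head?_drop
        rw [hdrop] at h1; simp [List.getD, ← h1]
      have hg1 : cs.getD (i+1) ' ' = d := by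
        have h1 : (cs.drop (i+1)).head? = cs[i+1]? := List.head?_drop
        rw [hd1] at h1; simp [List.getD, ← h1]
      have hg2 : cs.getD (i+2) ' ' = e := by
        have h1 : (cs.drop (i+2)).head? = cs[i+2]? := List.head?_drop
        rw [hd2] at h1; simp [List.getD, ← h1]
      rw [hg0, hg1, hg2, hdrop, aList]
      by_cases hcde : d.toNat = c.toNat + 1 ∧ e.toNat = d.toNat + 1
      · rw [if_pos hcde, if_pos hcde]
        have hinner := aInner_eq_takeRun t cs (i+3) 3 e (by omega) (by simpa using hd2)
        have hlt : cs.length - (aInner cs (i+3) 3).2 ≤ n := by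
          have hdl : (cs.drop ((aInner cs (i+3) 3).2)).length
              = cs.length - (aInner cs (i+3) 3).2 := List.length_drop
          rw [hinner.2] at hdl
          have htl := takeRun_snd_len t e 3
          have hdl3 : (cs.drop i).length = cs.length - i := List.length_drop
          rw [hdrop] at hdl3
          simp at hdl3
          omega
        rw [ih _ _ hlt, hinner.1, hinner.2]
      · rw [if_neg hcde, if_neg hcde, ih (i+1) count (by omega), hd1]
    · rw [dif_neg h]
      have hlen : (cs.drop i).length ≤ 2 := by
        have h3 : (cs.drop i).length = cs.length - i := List.length_drop
        omega
      match hx : cs.drop i with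
      | [] => rw [aList_nil]
      | [c] => rw [aList_one]
      | [c, d] => rw [aList_two]
      | c :: d :: e :: t => rw [hx] at hlen; simp at hlen

-- the run-length formulation F simulates takeRun once a run of length ≥ 3 is in progress
theorem F_run (t : List Char) (c : Char) (count run : Int) (h : 3 ≤ run) :
    F c t count run =
      (match (takeRun c t run).2 with
       | [] => count + (takeRun c t run).1
       | x :: r => F x r (count + (takeRun c t run).1) 1) := by
  induction t generalizing c run with
  | nil => simp [F, takeRun, h]
  | cons x r ih =>
    by_cases hx : x.toNat = c.toNat + 1
    · rw [show takeRun c (x :: r) run = takeRun x r (run+1) from by simp [takeRun, hx],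
          show F c (x :: r) count run = F x r count (run+1) from by simp [F, hx]]
      exact ih x (run+1) (by omega)
    · rw [show takeRun c (x :: r) run = (run, x :: r) from by simp [takeRun, hx]]
      simp only [F, if_neg hx, if_pos (by omega : run ≥ 3)]

-- main list-level equivalence: A's scan equals B's run accumulator
theorem aList_cons_eq_F (n : Nat) : ∀ (c : Char) (t : List Char) (count : Int),
    t.length ≤ n → aList (c :: t) count = F c t count 1 := by
  induction n with
  | zero =>
    intro c t count ht
    have : t = [] := by cases t with | nil => rfl | cons _ _ => simp at ht
    subst this
    rw [aList_one]; simp [F]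
  | succ n ih =>
    intro c t count ht
    match t with
    | [] => rw [aList_one]; simp [F]
    | [d] =>
      rw [aList_two]
      by_cases hd : d.toNat = c.toNat + 1 <;> simp [F, hd]
    | d :: e :: t' =>
      rw [aList]
      by_cases h : d.toNat = c.toNat + 1 ∧ e.toNat = d.toNat + 1
      · rw [if_pos h]
        have hF1 : F c (d :: e :: t') count 1 = F d (e :: t') count 2 := by
          conv_lhs => rw [F.eq_def]
          simp [h.1]
        have hF2 : F d (e :: t') count 2 = F e t' count 3 := by
          conv_lhs => rw [F.eq_def]
          simp [h.2]
        rw [hF1, hF2, F_run t' e count 3 (by omega)]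
        have htl := takeRun_snd_len t' e 3
        match hr : (takeRun e t' 3).2 with
        | [] => rw [aList_nil]
        | x :: r =>
          rw [hr] at htl
          have hrlen : r.length ≤ n := by simp at htl ht; omega
          rw [ih x r (count + (takeRun e t' 3).1) hrlen]
      · rw [if_neg h]
        have hrec := ih d (e :: t') count (by simp at ht ⊢; omega)
        rw [hrec]
        by_cases hd : d.toNat = c.toNat + 1
        · have he : ¬ e.toNat = d.toNat + 1 := fun hc => h ⟨hd, hc⟩
          have h1 : F c (d :: e :: t') count 1 = F d (e :: t') count 2 := by
            conv_lhs => rw [F.eq_def]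
            simp [hd]
          have h2 : F d (e :: t') count 2 = F e t' count 1 := by
            conv_lhs => rw [F.eq_def]
            simp [he]
          have h3 : F d (e :: t') count 1 = F e t' count 1 := by
            conv_lhs => rw [F.eq_def]
            simp [he]
          rw [h1, h2, h3]
        · conv_rhs => rw [F.eq_def]
          simp [hd]

-- ===== VERDICT (by name: the statement is the Claim_ definition above) =====
theorem count_sequential_chars_py_spec : Claim_equal_count_sequential_chars_py := by
  intro password _
  unfold Spec_count_sequential_chars_py count_sequential_chars_py count_sequential_chars_py_alt
  rw [aLoop_eq_aList password.toList.length password.toList 0 0 (by omega), List.drop_zero]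
  match h : password.toList with
  | [] => rw [aList_nil]; simp
  | c :: t =>
    rw [aList_cons_eq_F t.length c t 0 le_rfl]
    simpa using (foldl_bStep_eq_F t c 0 1).symm
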